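-- pv_equiv track=rewrite | github.com/giorgia-nadizar/nca-vsr-classification | nca_classification.py | shape_to_string
-- ===== SOURCE A (Python) =====
-- from typing import List, Tuple
--
-- def shape_to_string(shape: List[List[int]], hide_extra_zeros: bool = True) -> str:
--   mi = min([row.index(1) for row in shape if 1 in row]) if hide_extra_zeros else 0
--   ma = max([len(row) - 1 - row[::-1].index(1) for row in shape if 1 in row]) if hide_extra_zeros else len(shape[0]) - 1
--   strings = []
--   for row in shape:
--     if (hide_extra_zeros and 1 in row) or not hide_extra_zeros:
--       strings.append(''.join(str(row[k]) for k in range(mi, ma + 1)))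
--   return '-'.join(strings)
-- ===== SOURCE B (Python) =====
-- def shape_to_string(shape, hide_extra_zeros=True):
--     if hide_extra_zeros:
--         kept = [row for row in shape if any(v == 1 for v in row)]
--         width = max(len(r) for r in kept)
--         lo = next(j for j in range(width)
--                   if any(j < len(r) and r[j] == 1 for r in kept))
--         hi = next(j for j in range(width - 1, -1, -1)
--                   if any(j < len(r) and r[j] == 1 for r in kept))
--     else:
--         kept = shape
--         lo, hi = 0, len(shape[0]) - 1
--     return '-'.join(''.join(str(v) for v in row[lo:hi + 1]) for row in kept)
-- ===== Notes on version B (the rewrite author's own statement) =====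
-- stated objective: alternative
-- what changed: B finds the trim bounds by probing columns (first column from the left and first from the right in which any kept row holds a 1) instead of A's per-row first/last .index searches aggregated with min/max, and emits row slices instead of indexing over range(mi, ma+1).
-- outside the precondition, e.g. on shape_to_string([[1, 0], [0, 0, 1]], True): A raises IndexError, B returns '10-001'; on shape_to_string([[1, 0], [2]], False): A raises IndexError, B returns '10-2'; on shape_to_string([], True): A raises ValueError, B raises ValueError
import Mathlib
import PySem

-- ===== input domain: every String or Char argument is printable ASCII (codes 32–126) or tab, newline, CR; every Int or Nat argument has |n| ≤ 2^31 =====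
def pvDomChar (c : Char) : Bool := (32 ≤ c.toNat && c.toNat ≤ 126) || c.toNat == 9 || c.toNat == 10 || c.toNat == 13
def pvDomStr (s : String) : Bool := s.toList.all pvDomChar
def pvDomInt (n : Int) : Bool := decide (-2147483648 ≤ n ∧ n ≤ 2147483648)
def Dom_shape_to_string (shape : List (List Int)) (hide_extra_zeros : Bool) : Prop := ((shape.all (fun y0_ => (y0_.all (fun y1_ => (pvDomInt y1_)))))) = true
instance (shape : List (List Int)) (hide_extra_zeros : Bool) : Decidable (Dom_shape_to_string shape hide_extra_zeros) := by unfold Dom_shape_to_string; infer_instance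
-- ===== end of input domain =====

-- B finds the trim bounds by probing columns from the left and from the right for a 1 in any kept
-- row (instead of A's per-row first/last .index searches aggregated with min/max) and joins row
-- slices: an alternative algorithm of the same cost.

-- ===== PORT A =====
-- row[::-1] is ported as row.reverse (exact: PySem.List.slice?_none_none_neg_one).
def shape_to_string (shape : List (List Int)) (hide_extra_zeros : Bool) : String :=
  let withOne := shape.filter (fun row => decide ((1 : Int) ∈ row))
  let mi : Int :=
    if hide_extra_zeros then
      (PySem.List.min? (withOne.map (fun row => (((PySem.List.index? row 1).getD 0 : Nat) : Int)))
        (fun x => x)).getD 0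
    else 0
  let ma : Int :=
    if hide_extra_zeros then
      (PySem.List.max? (withOne.map (fun row =>
          (row.length : Int) - 1 - (((PySem.List.index? row.reverse 1).getD 0 : Nat) : Int)))
        (fun x => x)).getD 0
    else (((PySem.List.pyGet? shape 0).getD []).length : Int) - 1
  let strings : List String := shape.foldl (fun acc row =>
      if (hide_extra_zeros && decide ((1 : Int) ∈ row)) || !hide_extra_zeros then
        acc ++ [PySem.Str.join "" ((PySem.List.pyRange mi (ma + 1) 1).map
                  (fun k => PySem.Int.toStr (PySem.List.pyGetD row k 0)))]
      else acc) []
  PySem.Str.join "-" strings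

-- ===== PORT B =====
-- 'any(j < len(r) and r[j] == 1 for r in kept)' (j is always ≥ 0 where B uses it)
def pvColHasOne (kept : List (List Int)) (j : Int) : Bool :=
  kept.any (fun r => decide (j < (r.length : Int)) && decide (PySem.List.pyGetD r j 0 = 1))

-- next(j for j in range(..) if ..) is ported as find? on the range; the .getD 0 is only a
-- totaliser for the StopIteration case, which Pre_ excludes (kept always has a 1 there).
def shape_to_string_alt (shape : List (List Int)) (hide_extra_zeros : Bool) : String :=
  if hide_extra_zeros then
    let kept := shape.filter (fun row => row.any (fun v => decide (v = 1)))
    let width : Int := (PySem.List.max? (kept.map (fun r => (r.length : Int))) (fun x => x)).getD 0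
    let lo : Int := ((PySem.List.pyRange 0 width 1).find? (pvColHasOne kept)).getD 0
    let hi : Int := ((PySem.List.pyRange (width - 1) (-1) (-1)).find? (pvColHasOne kept)).getD 0
    PySem.Str.join "-" (kept.map (fun row =>
      PySem.Str.join "" ((PySem.List.slice row (some lo) (some (hi + 1))).map PySem.Int.toStr)))
  else
    let lo : Int := 0
    let hi : Int := (((PySem.List.pyGet? shape 0).getD []).length : Int) - 1
    PySem.Str.join "-" (shape.map (fun row =>
      PySem.Str.join "" ((PySem.List.slice row (some lo) (some (hi + 1))).map PySem.Int.toStr)))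

-- ===== PRECONDITION & SPEC =====
-- Pre_ excludes exactly the inputs where A raises: with hide_extra_zeros, shapes with no 1 anywhere
-- (min([]) → ValueError, B's max() raises there too) and shapes where some row containing a 1 is
-- shorter than 1 + the rightmost 1-column (IndexError); without it, the empty shape (shape[0] →
-- IndexError) and shapes with a row shorter than the first row (IndexError).
def Pre_shape_to_string (shape : List (List Int)) (hide_extra_zeros : Bool) : Prop :=
  if hide_extra_zeros then
    (∃ r ∈ shape, (1 : Int) ∈ r) ∧
    (∀ r ∈ shape, (1 : Int) ∈ r → ∀ r' ∈ shape, ∀ j < r'.length, r'.getD j 0 = 1 → j < r.length)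
  else
    shape ≠ [] ∧ ∀ r ∈ shape, (shape.headD []).length ≤ r.length

instance (shape : List (List Int)) (hide_extra_zeros : Bool) : Decidable (Pre_shape_to_string shape hide_extra_zeros) := by unfold Pre_shape_to_string; infer_instance

def pvWitness_shape_to_string : List (List Int) × Bool := ([[0, 1, 0], [1, 0, 2]], true)

def Spec_shape_to_string (shape : List (List Int)) (hide_extra_zeros : Bool) (out : String) : Prop := out = shape_to_string_alt shape hide_extra_zeros
instance (shape : List (List Int)) (hide_extra_zeros : Bool) (out : String) : Decidable (Spec_shape_to_string shape hide_extra_zeros out) := by unfold Spec_shape_to_string; infer_instance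

-- ===== CLAIM (what is proved, stated in full; the proofs are below) =====
def Claim_equal_shape_to_string : Prop := ∀ (shape : List (List Int)) (hide_extra_zeros : Bool), Dom_shape_to_string shape hide_extra_zeros → Pre_shape_to_string shape hide_extra_zeros → Spec_shape_to_string shape hide_extra_zeros (shape_to_string shape hide_extra_zeros)

-- ===== LEMMAS AND PROOFS =====

-- '[j for j, v in enumerate(row) if v == 1]' (proof-side only: the set of 1-columns of a row)
def pvOnes (row : List Int) : List Int :=
  (PySem.List.enumerate row 0).filterMap (fun jv => if jv.2 = 1 then some jv.1 else none)

theorem mem_onesFrom (row : List Int) (s x : Int) :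
    x ∈ (PySem.List.enumerate row s).filterMap (fun jv => if jv.2 = 1 then some jv.1 else none) ↔
      ∃ (k : Nat), ∃ (hk : k < row.length), x = s + k ∧ row[k] = 1 := by
  induction row generalizing s with
  | nil => simp [PySem.List.enumerate_nil]
  | cons a t ih =>
    rw [PySem.List.enumerate_cons, List.filterMap_cons]
    by_cases ha : a = 1
    · rw [show (if ((s, a).2 = 1) then some (s, a).1 else none) = some s by simp [ha]]
      simp only [List.mem_cons, ih]
      constructor
      · rintro (rfl | ⟨k, hk, rfl, h1⟩)
        · exact ⟨0, by simp, by simp, by simpa using ha⟩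
        · exact ⟨k + 1, by simp; omega, by push_cast; ring, by simpa using h1⟩
      · rintro ⟨k, hk, rfl, h1⟩
        cases k with
        | zero => left; simp
        | succ k =>
          right
          refine ⟨k, by simp at hk; omega, by push_cast; ring, by simpa using h1⟩
    · rw [show (if ((s, a).2 = 1) then some (s, a).1 else none) = none by simp [ha]]
      simp only [ih]
      constructor
      · rintro ⟨k, hk, rfl, h1⟩
        exact ⟨k + 1, by simp; omega, by push_cast; ring, by simpa using h1⟩
      · rintro ⟨k, hk, rfl, h1⟩
        cases k with
        | zero => exact absurd (by simpa using h1) ha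
        | succ k => exact ⟨k, by simp at hk; omega, by push_cast; ring, by simpa using h1⟩

theorem map_pyGetD_range (xs : List Int) (a b : Int) (ha : 0 ≤ a) (hb : b ≤ (xs.length : Int)) :
    (PySem.List.pyRange a b 1).map (fun k => PySem.List.pyGetD xs k 0) =
      (xs.drop a.toNat).take (b - a).toNat := by
  by_cases hab : b ≤ a
  · rw [PySem.List.pyRange_one_eq_nil hab]
    rw [show (b - a).toNat = 0 by omega]
    simp
  · rw [not_le] at hab
    rw [PySem.List.pyRange_one_cons hab, List.map_cons]
    rw [PySem.List.pyGetD_eq_getElem xs 0 ha (by omega)]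
    rw [List.drop_eq_getElem_cons (by omega : a.toNat < xs.length)]
    rw [show (b - a).toNat = (b - (a + 1)).toNat + 1 by omega, List.take_succ_cons]
    congr 1
    rw [show a.toNat + 1 = (a + 1).toNat by omega]
    exact map_pyGetD_range xs (a + 1) b (by omega) hb
termination_by (b - a).toNat
decreasing_by omega

theorem mem_pvOnes (row : List Int) (x : Int) :
    x ∈ pvOnes row ↔ ∃ (k : Nat), ∃ (hk : k < row.length), x = (k : Int) ∧ row[k] = 1 := by
  unfold pvOnes
  rw [mem_onesFrom]
  simp

theorem first_spec (row : List Int) (h : (1 : Int) ∈ row) :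
    ((((PySem.List.index? row 1).getD 0 : Nat) : Int) ∈ pvOnes row) ∧
      ∀ x ∈ pvOnes row, (((PySem.List.index? row 1).getD 0 : Nat) : Int) ≤ x := by
  have hs : (PySem.List.index? row 1).isSome := (PySem.List.index?_isSome_iff row 1).2 h
  obtain ⟨k, hk⟩ := Option.isSome_iff_exists.mp hs
  obtain ⟨hklen, hget, hmin⟩ := PySem.List.getElem_of_index?_eq_some hk
  rw [hk]
  simp only [Option.getD_some]
  constructor
  · exact (mem_pvOnes row k).2 ⟨k, hklen, rfl, hget⟩
  · intro x hx
    obtain ⟨j, hj, rfl, hj1⟩ := (mem_pvOnes row x).1 hx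
    by_contra hlt
    rw [not_le] at hlt
    exact hmin j (by exact_mod_cast hlt) hj1

theorem last_spec (row : List Int) (h : (1 : Int) ∈ row) :
    ((row.length : Int) - 1 - (((PySem.List.index? row.reverse 1).getD 0 : Nat) : Int) ∈ pvOnes row) ∧
      ∀ x ∈ pvOnes row,
        x ≤ (row.length : Int) - 1 - (((PySem.List.index? row.reverse 1).getD 0 : Nat) : Int) := by
  have h' : (1 : Int) ∈ row.reverse := List.mem_reverse.2 h
  have hs : (PySem.List.index? row.reverse 1).isSome := (PySem.List.index?_isSome_iff _ 1).2 h'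
  obtain ⟨k, hk⟩ := Option.isSome_iff_exists.mp hs
  obtain ⟨hklen, hget, hmin⟩ := PySem.List.getElem_of_index?_eq_some hk
  rw [List.length_reverse] at hklen
  rw [List.getElem_reverse] at hget
  rw [hk]
  simp only [Option.getD_some]
  have hcast : (row.length : Int) - 1 - (k : Int) = ((row.length - 1 - k : Nat) : Int) := by omega
  constructor
  · rw [hcast]
    exact (mem_pvOnes row _).2 ⟨row.length - 1 - k, by omega, rfl, by
      convert hget using 2⟩
  · intro x hx
    obtain ⟨j, hj, rfl, hj1⟩ := (mem_pvOnes row x).1 hx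
    by_contra hlt
    rw [not_le] at hlt
    have hjk : row.length - 1 - j < k := by omega
    refine hmin (row.length - 1 - j) hjk ?_
    rw [List.getElem_reverse]
    simp only [show row.length - 1 - (row.length - 1 - j) = j from by omega]
    exact hj1

-- pvColHasOne at a nonnegative j holds iff j is a 1-column of some kept row
theorem colHasOne_iff (kept : List (List Int)) (j : Int) (hj : 0 ≤ j) :
    pvColHasOne kept j = true ↔ ∃ r ∈ kept, j ∈ pvOnes r := by
  unfold pvColHasOne
  simp only [List.any_eq_true, Bool.and_eq_true, decide_eq_true_eq]
  constructor
  · rintro ⟨r, hr, hlt, hget⟩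
    refine ⟨r, hr, (mem_pvOnes r j).2 ⟨j.toNat, by omega, by omega, ?_⟩⟩
    rw [PySem.List.pyGetD_eq_getElem r 0 hj (by omega)] at hget
    exact hget
  · rintro ⟨r, hr, hmem⟩
    obtain ⟨k, hk, rfl, h1⟩ := (mem_pvOnes r j).1 hmem
    refine ⟨r, hr, by exact_mod_cast hk, ?_⟩
    rw [PySem.List.pyGetD_eq_getElem r 0 (by positivity) (by simpa using hk)]
    simpa using h1

theorem find?_pyRange_asc (p : Int → Bool) (a b m : Int) (ham : a ≤ m) (hmb : m < b)
    (hpm : p m = true) (hmin : ∀ j, a ≤ j → j < m → p j = false) :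
    (PySem.List.pyRange a b 1).find? p = some m := by
  rw [PySem.List.pyRange_one_cons (by omega : a < b), List.find?_cons]
  by_cases hma : m = a
  · rw [show p a = true from hma ▸ hpm]; simp [hma]
  · rw [hmin a le_rfl (by omega)]
    exact find?_pyRange_asc p (a + 1) b m (by omega) hmb hpm (fun j h1 h2 => hmin j (by omega) h2)
termination_by (m - a).toNat
decreasing_by omega

theorem find?_pyRange_desc (p : Int → Bool) (a m : Int) (hm0 : 0 ≤ m) (hma : m ≤ a)
    (hpm : p m = true) (hmax : ∀ j, m < j → j ≤ a → p j = false) :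
    (PySem.List.pyRange a (-1) (-1)).find? p = some m := by
  rw [PySem.List.pyRange_neg_one_cons (by omega : (-1 : Int) < a), List.find?_cons]
  by_cases hma' : m = a
  · rw [show p a = true from hma' ▸ hpm]; simp [hma']
  · rw [hmax a (by omega) le_rfl]
    exact find?_pyRange_desc p (a - 1) m hm0 (by omega) hpm (fun j h1 h2 => hmax j h1 (by omega))
termination_by (a - m).toNat
decreasing_by omega

theorem ports_eq (shape : List (List Int)) (hide : Bool)
    (hpre : Pre_shape_to_string shape hide) :
    shape_to_string shape hide = shape_to_string_alt shape hide := by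
  cases hide with
  | false =>
    simp only [Pre_shape_to_string, Bool.false_eq_true, if_false] at hpre
    obtain ⟨hne, hlen⟩ := hpre
    obtain ⟨r0, rest, rfl⟩ : ∃ r0 rest, shape = r0 :: rest := by
      cases shape with
      | nil => exact absurd rfl hne
      | cons a l => exact ⟨a, l, rfl⟩
    unfold shape_to_string shape_to_string_alt
    simp only [Bool.false_eq_true, if_false, Bool.false_and, Bool.not_false, Bool.or_true,
      if_true, PySem.List.foldl_append_singleton_eq_map, List.nil_append]
    have hget0 : PySem.List.pyGet? (r0 :: rest) (0 : Int) = some r0 := by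
      simp [PySem.List.pyGet?, PySem.List.pyIdx?]
    rw [hget0]
    simp only [Option.getD_some]
    congr 1
    apply List.map_congr_left
    intro row hrow
    have hrl : (r0.length : Int) ≤ (row.length : Int) := by
      exact_mod_cast hlen row hrow
    have hb : (r0.length : Int) - 1 + 1 = (r0.length : Int) := by ring
    rw [hb]
    have comp : (PySem.List.pyRange 0 (r0.length : Int) 1).map
          (fun k => PySem.Int.toStr (PySem.List.pyGetD row k 0)) =
        ((PySem.List.pyRange 0 (r0.length : Int) 1).map
          (fun k => PySem.List.pyGetD row k 0)).map PySem.Int.toStr := by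
      simp [List.map_map, Function.comp]
    rw [comp, map_pyGetD_range row 0 (r0.length : Int) le_rfl hrl,
      PySem.List.slice_toNat row (by norm_num) (by positivity)]
    simp
  | true =>
    simp only [Pre_shape_to_string, if_true] at hpre
    obtain ⟨⟨rw1, hrw1, h1rw1⟩, hlen⟩ := hpre
    unfold shape_to_string shape_to_string_alt
    simp only [if_true, Bool.true_and, Bool.not_true, Bool.or_false,
      PySem.List.foldl_append_if, List.nil_append]
    -- B's filter predicate equals A's
    have hfilt : shape.filter (fun row => row.any (fun v => decide (v = 1))) =
        shape.filter (fun row => decide ((1 : Int) ∈ row)) := by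
      apply List.filter_congr
      intro r _
      rw [Bool.eq_iff_iff]
      simp only [List.any_eq_true, decide_eq_true_eq]
      constructor
      · rintro ⟨v, hv, rfl⟩; exact hv
      · intro hv; exact ⟨1, hv, rfl⟩
    rw [hfilt]
    set K := shape.filter (fun row => decide ((1 : Int) ∈ row)) with hK
    have hKmem : ∀ r ∈ K, r ∈ shape ∧ (1 : Int) ∈ r := by
      intro r hr
      rw [hK, List.mem_filter] at hr
      exact ⟨hr.1, by simpa using hr.2⟩
    have hrw1K : rw1 ∈ K := by
      rw [hK, List.mem_filter]; exact ⟨hrw1, by simpa using h1rw1⟩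
    -- the (proof-side) flat list of all 1-columns of kept rows and its min/max
    set cols := K.flatMap pvOnes with hcols
    have hcolsne : cols ≠ [] := by
      have : (((PySem.List.index? rw1 1).getD 0 : Nat) : Int) ∈ cols := by
        rw [hcols]
        exact List.mem_flatMap.2 ⟨rw1, hrw1K, (first_spec rw1 h1rw1).1⟩
      exact List.ne_nil_of_mem this
    obtain ⟨m, hm⟩ : ∃ m, PySem.List.min? cols (fun x => x) = some m := by
      cases h : PySem.List.min? cols (fun x => x) with
      | none => exact absurd ((PySem.List.min?_eq_none_iff cols _).1 h) hcolsne
      | some m => exact ⟨m, rfl⟩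
    obtain ⟨M, hM⟩ : ∃ M, PySem.List.max? cols (fun x => x) = some M := by
      cases h : PySem.List.max? cols (fun x => x) with
      | none => exact absurd ((PySem.List.max?_eq_none_iff cols _).1 h) hcolsne
      | some M => exact ⟨M, rfl⟩
    -- A's min over per-row first indices is m, max over per-row last indices is M
    set LF := K.map (fun row => (((PySem.List.index? row 1).getD 0 : Nat) : Int)) with hLF
    set LL := K.map (fun row =>
        (row.length : Int) - 1 - (((PySem.List.index? row.reverse 1).getD 0 : Nat) : Int)) with hLL
    obtain ⟨mA, hmA⟩ : ∃ m, PySem.List.min? LF (fun x => x) = some m := by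
      cases h : PySem.List.min? LF (fun x => x) with
      | none =>
        have : LF = [] := (PySem.List.min?_eq_none_iff LF _).1 h
        rw [hLF, List.map_eq_nil_iff] at this
        exact absurd (this ▸ hrw1K) (List.not_mem_nil)
      | some v => exact ⟨v, rfl⟩
    obtain ⟨MA, hMA⟩ : ∃ v, PySem.List.max? LL (fun x => x) = some v := by
      cases h : PySem.List.max? LL (fun x => x) with
      | none =>
        have : LL = [] := (PySem.List.max?_eq_none_iff LL _).1 h
        rw [hLL, List.map_eq_nil_iff] at this
        exact absurd (this ▸ hrw1K) (List.not_mem_nil)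
      | some v => exact ⟨v, rfl⟩
    have hmAm : mA = m := by
      have h1 : m ≤ mA := by
        obtain ⟨r, hrK, hr⟩ := List.mem_map.1 (PySem.List.min?_mem hmA)
        have h1r := (hKmem r hrK).2
        have : mA ∈ cols := by
          rw [hcols]
          exact List.mem_flatMap.2 ⟨r, hrK, hr ▸ (first_spec r h1r).1⟩
        exact PySem.List.min?_isMin hm _ this
      have h2 : mA ≤ m := by
        obtain ⟨r, hrK, hmr⟩ := List.mem_flatMap.1 (hcols ▸ PySem.List.min?_mem hm)
        have h1r := (hKmem r hrK).2
        have hfr : (((PySem.List.index? r 1).getD 0 : Nat) : Int) ≤ m :=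
          (first_spec r h1r).2 m hmr
        have : (((PySem.List.index? r 1).getD 0 : Nat) : Int) ∈ LF := by
          rw [hLF]; exact List.mem_map.2 ⟨r, hrK, rfl⟩
        exact le_trans (PySem.List.min?_isMin hmA _ this) hfr
      omega
    have hMAM : MA = M := by
      have h1 : MA ≤ M := by
        obtain ⟨r, hrK, hr⟩ := List.mem_map.1 (PySem.List.max?_mem hMA)
        have h1r := (hKmem r hrK).2
        have : MA ∈ cols := by
          rw [hcols]
          exact List.mem_flatMap.2 ⟨r, hrK, hr ▸ (last_spec r h1r).1⟩
        exact PySem.List.max?_isMax hM _ this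
      have h2 : M ≤ MA := by
        obtain ⟨r, hrK, hmr⟩ := List.mem_flatMap.1 (hcols ▸ PySem.List.max?_mem hM)
        have h1r := (hKmem r hrK).2
        have hfr : M ≤ (r.length : Int) - 1 - (((PySem.List.index? r.reverse 1).getD 0 : Nat) : Int) :=
          (last_spec r h1r).2 M hmr
        have : (r.length : Int) - 1 - (((PySem.List.index? r.reverse 1).getD 0 : Nat) : Int) ∈ LL := by
          rw [hLL]; exact List.mem_map.2 ⟨r, hrK, rfl⟩
        exact le_trans hfr (PySem.List.max?_isMax hMA _ this)
      omega
    -- bounds on m and M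
    have hm0 : 0 ≤ m := by
      obtain ⟨r, hrK, hmr⟩ := List.mem_flatMap.1 (hcols ▸ PySem.List.min?_mem hm)
      obtain ⟨k, hk, rfl, _⟩ := (mem_pvOnes r m).1 hmr
      positivity
    have hM0 : 0 ≤ M := le_trans hm0 (PySem.List.min?_isMin hm _ (hcols ▸ PySem.List.max?_mem hM))
    have hmM : m ≤ M := PySem.List.min?_isMin hm _ (hcols ▸ PySem.List.max?_mem hM)
    -- B's width and its relation to cols
    obtain ⟨W, hW⟩ : ∃ W, PySem.List.max? (K.map (fun r => ((r.length : Nat) : Int))) (fun x => x) = some W := by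
      cases h : PySem.List.max? (K.map (fun r => ((r.length : Nat) : Int))) (fun x => x) with
      | none =>
        have : K.map (fun r => ((r.length : Nat) : Int)) = [] := (PySem.List.max?_eq_none_iff _ _).1 h
        rw [List.map_eq_nil_iff] at this
        exact absurd (this ▸ hrw1K) (List.not_mem_nil)
      | some v => exact ⟨v, rfl⟩
    have hcolsW : ∀ x ∈ cols, x < W := by
      intro x hx
      obtain ⟨r, hrK, hxr⟩ := List.mem_flatMap.1 (hcols ▸ hx)
      obtain ⟨k, hk, rfl, _⟩ := (mem_pvOnes r x).1 hxr
      have : ((r.length : Nat) : Int) ≤ W :=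
        PySem.List.max?_isMax hW _ (List.mem_map.2 ⟨r, hrK, rfl⟩)
      omega
    -- B's lo is m
    have hlo : (PySem.List.pyRange 0 W 1).find? (pvColHasOne K) = some m := by
      apply find?_pyRange_asc _ _ _ _ hm0 (hcolsW m (hcols ▸ PySem.List.min?_mem hm))
      · exact (colHasOne_iff K m hm0).2 (List.mem_flatMap.1 (hcols ▸ PySem.List.min?_mem hm))
      · intro j hj0 hjm
        by_contra hpj
        rw [Bool.not_eq_false] at hpj
        obtain ⟨r, hrK, hjr⟩ := (colHasOne_iff K j hj0).1 hpj
        have : j ∈ cols := hcols ▸ List.mem_flatMap.2 ⟨r, hrK, hjr⟩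
        have := PySem.List.min?_isMin hm _ this
        omega
    -- B's hi is M
    have hhi : (PySem.List.pyRange (W - 1) (-1) (-1)).find? (pvColHasOne K) = some M := by
      apply find?_pyRange_desc _ _ _ hM0 (by
        have := hcolsW M (hcols ▸ PySem.List.max?_mem hM); omega)
      · exact (colHasOne_iff K M hM0).2 (List.mem_flatMap.1 (hcols ▸ PySem.List.max?_mem hM))
      · intro j hMj hjW
        by_contra hpj
        rw [Bool.not_eq_false] at hpj
        obtain ⟨r, hrK, hjr⟩ := (colHasOne_iff K j (by omega)).1 hpj
        have : j ∈ cols := hcols ▸ List.mem_flatMap.2 ⟨r, hrK, hjr⟩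
        have := PySem.List.max?_isMax hM _ this
        omega
    rw [hmA, hMA, hW]
    simp only [Option.getD_some]
    rw [hlo, hhi]
    simp only [Option.getD_some, hmAm, hMAM]
    -- rows are long enough for the window (Pre_)
    have hMrow : ∀ r ∈ K, M + 1 ≤ (r.length : Int) := by
      intro r hrK
      obtain ⟨r', hr'K, hMr'⟩ := List.mem_flatMap.1 (hcols ▸ PySem.List.max?_mem hM)
      obtain ⟨k, hk, rfl, hk1⟩ := (mem_pvOnes r' M).1 hMr'
      have := hlen r (hKmem r hrK).1 (hKmem r hrK).2 r' (hKmem r' hr'K).1 k hk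
        (by rw [List.getD_eq_getElem r' 0 hk]; exact hk1)
      omega
    -- per-row strings agree
    congr 1
    apply List.map_congr_left
    intro row hrow
    have hrl : (M + 1 : Int) ≤ (row.length : Int) := hMrow row hrow
    have comp : (PySem.List.pyRange m (M + 1) 1).map
          (fun k => PySem.Int.toStr (PySem.List.pyGetD row k 0)) =
        ((PySem.List.pyRange m (M + 1) 1).map
          (fun k => PySem.List.pyGetD row k 0)).map PySem.Int.toStr := by
      simp [List.map_map, Function.comp]
    rw [comp, map_pyGetD_range row m (M + 1) hm0 hrl,
      PySem.List.slice_toNat row hm0 (by omega)]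
    rw [show (M + 1).toNat - m.toNat = (M + 1 - m).toNat from by omega]

-- ===== VERDICT (by name: the statement is the Claim_ definition above) =====
theorem shape_to_string_spec : Claim_equal_shape_to_string := by
  intro shape hide _ hpre
  unfold Spec_shape_to_string
  exact ports_eq shape hide hpre
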